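-- pv_equiv track=rewrite | github.com/pablokan/24EFIs | M1/joaquin/efi.py | cantidadReservas
-- ===== SOURCE A (Python) =====
-- def cantidadReservas(turnos):
--     #diccionarios vacios
--     reservasDia = {} #almacena reservas por dia (YYYY-MM-DD)
--     reservasMes = {} #almacena reservas por mes (YYYY-MM)
--
--     #recorre el diccionario de los turnos
--     for turno in turnos:
--         fecha = turno["fecha"]
--         reservasDia[fecha] = reservasDia.get(fecha, 0) + 1  #el metodo .get() es una forma flexible de buscar un valor en un diccionario, permitiendo especificar un valor por defecto cuando la clave no existe.
--         #recorta mes y ano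
--         mes = fecha[5:7] #(MM)
--         reservasMes[mes] = reservasMes.get(mes, 0) + 1  #Inicializa en 0 si el mes no existe
--     return reservasMes, reservasDia
-- ===== SOURCE B (Python) =====
-- def cantidadReservas(turnos):
--     # flatten to the date list, dedup-then-count instead of incremental dict counting
--     fechas = [turno["fecha"] for turno in turnos]
--     reservasDia = {f: fechas.count(f) for f in dict.fromkeys(fechas)}
--     meses = dict.fromkeys(f[5:7] for f in fechas)
--     reservasMes = {m: sum(1 for f in fechas if f[5:7] == m) for m in meses}
--     return reservasMes, reservasDia
-- ===== Notes on version B (the rewrite author's own statement) =====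
-- stated objective: alternative
-- what changed: B first extracts the list of dates, then builds each result dict by a dedup-then-count comprehension (distinct keys in first-occurrence order, value = a count over the whole date list) instead of A's single loop that increments two dicts incrementally.
import Mathlib
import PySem

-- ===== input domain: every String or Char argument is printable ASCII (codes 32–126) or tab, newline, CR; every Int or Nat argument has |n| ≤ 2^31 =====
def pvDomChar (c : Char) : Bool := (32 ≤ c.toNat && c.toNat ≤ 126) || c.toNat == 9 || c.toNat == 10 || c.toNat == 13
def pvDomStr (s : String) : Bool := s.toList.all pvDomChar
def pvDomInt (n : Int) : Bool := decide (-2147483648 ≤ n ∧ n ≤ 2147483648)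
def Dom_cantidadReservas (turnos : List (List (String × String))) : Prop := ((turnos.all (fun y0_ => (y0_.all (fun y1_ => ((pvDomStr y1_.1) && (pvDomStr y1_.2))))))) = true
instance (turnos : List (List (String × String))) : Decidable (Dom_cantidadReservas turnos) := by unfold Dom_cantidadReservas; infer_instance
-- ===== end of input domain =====

-- B extracts the date list and builds each dict by dedup-then-count comprehensions
-- instead of A's single incremental-counting loop (objective: alternative, same results).

-- ===== PORT A =====
-- turno["fecha"] : first-match lookup; Python raises KeyError when the key is missing —
-- those inputs are excluded by Pre_ (the "" default is never used there)
def pvFecha (turno : List (String × String)) : String :=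
  ((PySem.Dict.mk turno).get? "fecha").getD ""

-- fecha[5:7]
def pvMes (fecha : String) : String := PySem.Str.slice fecha (some 5) (some 7)

def cantidadReservas (turnos : List (List (String × String))) : (List (String × Int)) × (List (String × Int)) :=
  let st := turnos.foldl
    (fun (st : PySem.Dict String Int × PySem.Dict String Int) turno =>
      let fecha := pvFecha turno
      let reservasDia := st.1.insert fecha (st.1.getD fecha 0 + 1)
      let mes := pvMes fecha
      let reservasMes := st.2.insert mes (st.2.getD mes 0 + 1)
      (reservasDia, reservasMes))
    (PySem.Dict.empty, PySem.Dict.empty)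
  (st.2.items, st.1.items)

-- ===== PORT B =====
def cantidadReservas_alt (turnos : List (List (String × String))) : (List (String × Int)) × (List (String × Int)) :=
  let fechas := turnos.map pvFecha
  let reservasDia := (PySem.Set.ofList fechas).map (fun f => (f, (fechas.count f : Int)))
  let meses := PySem.Set.ofList (fechas.map pvMes)
  let reservasMes := meses.map (fun m => (m, ((fechas.filter (fun f => pvMes f == m)).length : Int)))
  (reservasMes, reservasDia)

-- ===== PRECONDITION & SPEC =====
-- Pre_ excludes exactly the inputs on which Python A raises KeyError: a turno without a "fecha" key.
def Pre_cantidadReservas (turnos : List (List (String × String))) : Prop :=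
  ∀ t ∈ turnos, "fecha" ∈ t.map (·.1)
instance (turnos : List (List (String × String))) : Decidable (Pre_cantidadReservas turnos) := by unfold Pre_cantidadReservas; infer_instance

def pvWitness_cantidadReservas : (List (List (String × String))) :=
  [[("fecha", "2023-05-01")], [("fecha", "2023-05-01")], [("fecha", "2023-06-02")]]

def Spec_cantidadReservas (turnos : List (List (String × String))) (out : (List (String × Int)) × (List (String × Int))) : Prop := out = cantidadReservas_alt turnos
instance (turnos : List (List (String × String))) (out : (List (String × Int)) × (List (String × Int))) : Decidable (Spec_cantidadReservas turnos out) := by unfold Spec_cantidadReservas; infer_instance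

-- ===== CLAIM (what is proved, stated in full; the proofs are below) =====
def Claim_equal_cantidadReservas : Prop := ∀ (turnos : List (List (String × String))), Dom_cantidadReservas turnos → Pre_cantidadReservas turnos → Spec_cantidadReservas turnos (cantidadReservas turnos)

-- ===== LEMMAS AND PROOFS =====

-- A's paired fold projects to two independent counting folds
theorem pvFoldA_proj (fs : List String) (d m : PySem.Dict String Int) :
    fs.foldl
      (fun (st : PySem.Dict String Int × PySem.Dict String Int) f =>
        (st.1.insert f (st.1.getD f 0 + 1),
         st.2.insert (pvMes f) (st.2.getD (pvMes f) 0 + 1)))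
      (d, m)
    = (fs.foldl (fun d f => d.insert f (d.getD f 0 + 1)) d,
       fs.foldl (fun m f => m.insert (pvMes f) (m.getD (pvMes f) 0 + 1)) m) := by
  induction fs generalizing d m with
  | nil => rfl
  | cons f fs ih => simpa using ih _ _

-- ===== VERDICT (by name: the statement is the Claim_ definition above) =====
theorem cantidadReservas_spec : Claim_equal_cantidadReservas := by
  intro turnos _hdom _hpre
  unfold Spec_cantidadReservas cantidadReservas cantidadReservas_alt
  simp only []
  rw [show (fun (st : PySem.Dict String Int × PySem.Dict String Int) turno =>
        let fecha := pvFecha turno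
        let reservasDia := st.1.insert fecha (st.1.getD fecha 0 + 1)
        let mes := pvMes fecha
        let reservasMes := st.2.insert mes (st.2.getD mes 0 + 1)
        (reservasDia, reservasMes))
      = (fun (st : PySem.Dict String Int × PySem.Dict String Int) f =>
          ((st.1.insert (pvFecha f) (st.1.getD (pvFecha f) 0 + 1)),
           (st.2.insert (pvMes (pvFecha f)) (st.2.getD (pvMes (pvFecha f)) 0 + 1)))) from rfl]
  rw [← List.foldl_map (f := pvFecha)
      (g := fun (st : PySem.Dict String Int × PySem.Dict String Int) f =>
        ((st.1.insert f (st.1.getD f 0 + 1)),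
         (st.2.insert (pvMes f) (st.2.getD (pvMes f) 0 + 1))))]
  set fs := turnos.map pvFecha with hfs
  rw [pvFoldA_proj]
  -- day side: the counting fold is Counter(fs), whose items are B's comprehension
  have hdia : fs.foldl (fun (d : PySem.Dict String Int) f => d.insert f (d.getD f 0 + 1))
      PySem.Dict.empty = PySem.Dict.counter fs :=
    PySem.Dict.foldl_insert_getD_add_one_eq_counter fs
  -- month side: the counting fold over fs at key pvMes f is the counting fold over fs.map pvMes
  have hmes : fs.foldl (fun (m : PySem.Dict String Int) f =>
        m.insert (pvMes f) (m.getD (pvMes f) 0 + 1)) PySem.Dict.empty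
      = PySem.Dict.counter (fs.map pvMes) := by
    rw [← PySem.Dict.foldl_insert_getD_add_one_eq_counter (fs.map pvMes), List.foldl_map,
       hfs, List.foldl_map, List.foldl_map]
  rw [hdia, hmes, PySem.Dict.items_counter, PySem.Dict.items_counter]
  -- counts over the mapped list = filtered lengths over fs
  congr 1
  apply List.map_congr_left
  intro m _hm
  congr 1
  rw [List.count_eq_countP, List.countP_map, List.countP_eq_length_filter]
  rfl
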